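-- pv_equiv track=rewrite | github.com/Wojti-7/logia | Zadania/logia23_e3_zad1.py | liczby_sfeniczne
-- ===== SOURCE A (Python) =====
-- def czy_sfeniczna(n):
--     w = 0
--     for i in range(1, n+1, 1):
--         if (n % i == 0):
--             w += 1
--     if (w == 8):
--         return True
--     else:
--         return False
--
-- def liczby_sfeniczne(n):
--     w = ''
--     j = n + 1
--     p = 0
--     while p != 3:
--         if (czy_sfeniczna(j)):
--             w += str(j) + ' '
--             p += 1
--         j += 1
--     return w
-- ===== SOURCE B (Python) =====
-- def liczby_sfeniczne(n):
--     def has_eight_divisors(j):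
--         if j < 1:
--             return False
--         c = 0
--         i = 1
--         while i * i <= j:
--             if j % i == 0:
--                 c += 1 if i * i == j else 2
--             i += 1
--         return c == 8
--     out = []
--     j = n + 1
--     while len(out) < 3:
--         if has_eight_divisors(j):
--             out.append(j)
--         j += 1
--     return ''.join(str(x) + ' ' for x in out)
-- ===== Notes on version B (the rewrite author's own statement) =====
-- stated objective: faster
-- what changed: B counts divisors with a factor-pair loop up to sqrt(j) (adding 2 per divisor pair, 1 for a square root) instead of A's trial loop over all i in 1..j, and collects the three hits in a list joined into the result string at the end.
import Mathlib
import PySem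

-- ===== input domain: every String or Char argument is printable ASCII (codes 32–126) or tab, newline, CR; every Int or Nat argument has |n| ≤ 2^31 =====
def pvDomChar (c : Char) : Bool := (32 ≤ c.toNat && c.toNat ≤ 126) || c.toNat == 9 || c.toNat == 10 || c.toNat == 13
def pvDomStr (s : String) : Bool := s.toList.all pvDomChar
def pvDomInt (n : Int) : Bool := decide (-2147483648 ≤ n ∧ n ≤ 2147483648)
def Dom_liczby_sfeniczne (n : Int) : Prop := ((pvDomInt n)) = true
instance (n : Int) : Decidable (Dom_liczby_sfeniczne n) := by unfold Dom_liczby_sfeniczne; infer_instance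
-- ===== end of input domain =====

-- B replaces A's O(j) divisor count by a factor-pair loop up to √j (asymptotically faster)
-- and collects the three hits in a list joined at the end; return values proved equal for all n.

-- ===== PORT A =====
-- czy_sfeniczna: w counts i in range(1, n+1) with n % i == 0; returns w == 8
def czyCount (nn : Int) : Int :=
  (PySem.List.pyRange 1 (nn + 1) 1).foldl
    (fun w i => if PySem.Int.mod nn i == 0 then w + 1 else w) 0

def czy_sfeniczna (nn : Int) : Bool := czyCount nn == 8

-- ===== PORT B (inner counter; needed here because A's outer-loop termination
--       proof and B's share the lemmas below) =====
-- hand-built measure lemmas, cited by sqrtLoop's decreasing_by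
theorem sqrtLoop_le (i j : Int) (h : i * i ≤ j) : i ≤ j :=
  (Int.lt_or_le 0 i).elim
    (fun h0 => le_trans (le_mul_of_one_le_left h0.le ((zero_add 1).symm.trans_le (Int.lt_iff_add_one_le.mp h0))) h)
    (fun h0 => le_trans h0 (le_trans (mul_self_nonneg i) h))

theorem sqrtLoop_measure_lt (i j : Int) (h : i * i ≤ j) :
    (j + 1 - (i + 1)).toNat < (j + 1 - i).toNat :=
  (Int.toNat_lt_toNat (Int.sub_pos.mpr (Int.lt_add_one_iff.mpr (sqrtLoop_le i j h)))).mpr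
    (sub_lt_sub_left (lt_add_one i) (j + 1))

-- while i*i <= j: if j % i == 0: c += 1 if i*i == j else 2; i += 1
def sqrtLoop (j i c : Int) : Int :=
  if h : i * i ≤ j then
    sqrtLoop j (i + 1) (if PySem.Int.mod j i == 0 then (if i * i == j then c + 1 else c + 2) else c)
  else c
termination_by (j + 1 - i).toNat
decreasing_by
  exact sqrtLoop_measure_lt i j h

def count8B (j : Int) : Bool := if j < 1 then false else sqrtLoop j 1 0 == 8

-- ==== termination helpers (cited by the ports' decreasing_by): every integer is
-- ==== below some number with exactly eight divisors (6p for a prime p ≥ 5) ====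

theorem foldl_ite_count {α : Type} (P : α → Bool) (l : List α) (c : Int) :
    l.foldl (fun w i => if P i then w + 1 else w) c = c + (l.countP P : Int) := by
  induction l generalizing c with
  | nil => simp
  | cons x xs ih =>
      by_cases h : P x
      · simp [h, ih]
        ring
      · simp [h, ih]

theorem countP_range_eq_card_filter (p : Nat → Prop) [DecidablePred p] (n : Nat) :
    (List.range n).countP (fun k => decide (p k)) = ((Finset.range n).filter p).card := by
  induction n with
  | zero => simp
  | succ n ih =>
      rw [List.range_succ, List.countP_append, Finset.range_add_one, Finset.filter_insert]
      by_cases h : p n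
      · rw [if_pos h, Finset.card_insert_of_notMem (by simp)]
        simp [h, ih]
      · simp [h, ih]

theorem card_filter_succ_dvd (m : Nat) (_hm : 1 ≤ m) :
    ((Finset.range m).filter (fun k => (k + 1) ∣ m)).card = m.divisors.card := by
  unfold Nat.divisors
  refine Finset.card_bij' (fun k _ => k + 1) (fun d _ => d - 1) ?_ ?_ ?_ ?_
  · intro k hk
    simp only [Finset.mem_filter, Finset.mem_range] at hk
    simp only [Finset.mem_filter, Finset.mem_Ico]
    exact ⟨⟨by omega, by omega⟩, hk.2⟩
  · intro d hd
    simp only [Finset.mem_filter, Finset.mem_Ico] at hd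
    simp only [Finset.mem_filter, Finset.mem_range]
    refine ⟨by omega, ?_⟩
    have : d - 1 + 1 = d := by omega
    rw [this]; exact hd.2
  · intro k _; simp
  · intro d hd
    simp only [Finset.mem_filter, Finset.mem_Ico] at hd
    simp only []
    omega

theorem czyCount_eq (m : Nat) (hm : 1 ≤ m) : czyCount (m : Int) = (m.divisors.card : Int) := by
  unfold czyCount
  rw [PySem.List.pyRange_one]
  have h1 : (((m : Int) + 1) - 1).toNat = m := by rw [add_sub_cancel_right, Int.toNat_natCast]
  rw [h1, List.foldl_map, foldl_ite_count (fun k : Nat => PySem.Int.mod (m : Int) (1 + (k : Int)) == 0)]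
  rw [List.countP_congr (q := fun k => decide ((k + 1) ∣ m)) ?_]
  · rw [countP_range_eq_card_filter (fun k => (k + 1) ∣ m) m, card_filter_succ_dvd m hm]
    ring
  · intro k _
    have h2 : (1 : Int) + (k : Int) = ((k + 1 : Nat) : Int) := by rw [Nat.cast_add, Nat.cast_one, add_comm]
    rw [h2, PySem.Int.mod_natCast]
    simp
    rw [show ((k : Int) + 1) = ((k + 1 : Nat) : Int) from by push_cast; ring,
      Int.natCast_dvd_natCast, Nat.dvd_iff_mod_eq_zero]

def contribD (m x : Nat) : Int := if x ∣ m then (if x * x = m then 1 else 2) else 0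

theorem sqrtLoop_inv (m : Nat) : ∀ (fuel i : Nat) (c : Int), 1 ≤ i → Nat.sqrt m + 1 - i = fuel →
    sqrtLoop (m : Int) (i : Int) c = c + ∑ x ∈ Finset.Ico i (Nat.sqrt m + 1), contribD m x := by
  intro fuel
  induction fuel with
  | zero =>
      intro i c hi hf
      have hgt : Nat.sqrt m < i := Nat.lt_of_succ_le (Nat.sub_eq_zero_iff_le.mp hf)
      have hmi : (m : Int) < (i : Int) * (i : Int) := by
        have h2 := Nat.sqrt_lt'.mp hgt
        rw [pow_two] at h2
        exact_mod_cast h2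
      rw [sqrtLoop, dif_neg (not_le.mpr hmi)]
      rw [Finset.Ico_eq_empty (not_lt.mpr (Nat.sub_eq_zero_iff_le.mp hf)), Finset.sum_empty]
      ring
  | succ fuel ih =>
      intro i c hi hf
      have hle : i ≤ Nat.sqrt m := Nat.lt_succ_iff.mp (Nat.lt_of_sub_eq_succ hf)
      have hii : (i : Int) * (i : Int) ≤ (m : Int) := by exact_mod_cast Nat.le_sqrt.mp hle
      rw [sqrtLoop, dif_pos hii]
      have hc' : (if PySem.Int.mod (m : Int) (i : Int) == 0 then
            (if (i : Int) * (i : Int) == (m : Int) then c + 1 else c + 2) else c)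
          = c + contribD m i := by
        unfold contribD
        rw [PySem.Int.mod_natCast]
        by_cases hd : i ∣ m
        · have h2 : m % i = 0 := (Nat.dvd_iff_mod_eq_zero).mp hd
          by_cases hsq : i * i = m
          · have hb : ((i : Int) * (i : Int) == (m : Int)) = true := by
              rw [beq_iff_eq]; exact_mod_cast hsq
            simp [h2, hb, hd, hsq]
          · have hb : ((i : Int) * (i : Int) == (m : Int)) = false := by
              rw [beq_eq_false_iff_ne]
              intro hcontra; exact hsq (by exact_mod_cast hcontra)
            simp [h2, hb, hd, hsq]
        · have h2 : m % i ≠ 0 := fun h0 => hd ((Nat.dvd_iff_mod_eq_zero).mpr h0)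
          simp [Int.natCast_dvd_natCast, hd]
      rw [hc']
      rw [show ((i : Int) + 1) = ((i + 1 : Nat) : Int) from by rw [Nat.cast_add, Nat.cast_one]]
      rw [ih (i + 1) (c + contribD m i) (Nat.succ_le_succ (Nat.zero_le i))
        (by rw [← Nat.sub_sub, hf, Nat.succ_sub_one])]
      rw [Finset.sum_eq_sum_Ico_succ_bot (Nat.lt_succ_of_le hle)]
      ring

theorem div_pair_facts (m d : Nat) (hm : 1 ≤ m) (hd : d ∣ m) (hgt : Nat.sqrt m < d) :
    (m / d) ∣ m ∧ m / d ≤ Nat.sqrt m ∧ ¬ (m / d) * (m / d) = m ∧ m / (m / d) = d := by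
  obtain ⟨e, he⟩ := hd
  have hd0 : 0 < d := Nat.pos_of_dvd_of_pos ⟨e, he⟩ hm
  have he0 : 0 < e := Nat.pos_of_dvd_of_pos ⟨d, he.trans (mul_comm d e)⟩ hm
  have hde : m / d = e := by rw [he, Nat.mul_div_cancel_left e hd0]
  have hmd : m < d * d := by
    have h2 := Nat.sqrt_lt'.mp hgt
    rwa [pow_two] at h2
  have hed : e < d := by
    rw [he] at hmd
    exact lt_of_mul_lt_mul_left hmd (Nat.zero_le d)
  have hee : e * e < m := by
    rw [he]
    exact mul_lt_mul_of_pos_right hed he0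
  refine ⟨?_, ?_, ?_, ?_⟩
  · rw [hde]; exact ⟨d, he.trans (mul_comm d e)⟩
  · rw [hde]; exact Nat.le_sqrt.mpr (le_of_lt hee)
  · rw [hde]; exact Nat.ne_of_lt hee
  · rw [hde, he, mul_comm, Nat.mul_div_cancel_left d he0]

theorem div_pair_facts' (m e : Nat) (hm : 1 ≤ m) (he : e ∣ m) (hle : e ≤ Nat.sqrt m)
    (hne : ¬ e * e = m) : (m / e) ∣ m ∧ ¬ m / e ≤ Nat.sqrt m ∧ m / (m / e) = e := by
  obtain ⟨d, hd⟩ := he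
  have he0 : 0 < e := Nat.pos_of_dvd_of_pos ⟨d, hd⟩ hm
  have hd0 : 0 < d := Nat.pos_of_dvd_of_pos ⟨e, hd.trans (mul_comm e d)⟩ hm
  have hed : m / e = d := by rw [hd, Nat.mul_div_cancel_left d he0]
  have heem : e * e < m := lt_of_le_of_ne (Nat.le_sqrt.mp hle) hne
  have hlt : e < d := by
    rw [hd] at heem
    exact lt_of_mul_lt_mul_left heem (Nat.zero_le e)
  have hmd : m < d * d := by
    rw [hd]
    exact mul_lt_mul_of_pos_right hlt hd0
  refine ⟨?_, ?_, ?_⟩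
  · rw [hed]; exact ⟨e, hd.trans (mul_comm e d)⟩
  · rw [hed]; exact fun hc => absurd (Nat.le_sqrt.mp hc) (not_le.mpr hmd)
  · rw [hed, hd, mul_comm e d, Nat.mul_div_cancel_left e hd0]

theorem sqrtLoop_eq (m : Nat) (hm : 1 ≤ m) : sqrtLoop (m : Int) 1 0 = (m.divisors.card : Int) := by
  have hinv := sqrtLoop_inv m (Nat.sqrt m) 1 0 le_rfl (by rw [Nat.add_sub_cancel])
  rw [Nat.cast_one] at hinv
  rw [hinv]
  set s := Nat.sqrt m with hs
  have hfil : (Finset.Ico 1 (s + 1)).filter (fun x => x ∣ m) = m.divisors.filter (fun x => x ≤ s) := by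
    ext x
    simp only [Finset.mem_filter, Finset.mem_Ico, Nat.mem_divisors]
    constructor
    · rintro ⟨⟨h1, h2⟩, hd⟩
      exact ⟨⟨hd, Nat.one_le_iff_ne_zero.mp hm⟩, Nat.lt_succ_iff.mp h2⟩
    · rintro ⟨⟨hd, hne⟩, hle⟩
      have hx0 : 0 < x := Nat.pos_of_dvd_of_pos hd hm
      exact ⟨⟨hx0, Nat.lt_succ_of_le hle⟩, hd⟩
  have hsum : ∑ x ∈ Finset.Ico 1 (s + 1), contribD m x
      = ∑ x ∈ m.divisors.filter (fun x => x ≤ s), (if x * x = m then (1 : Int) else 2) := by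
    rw [← hfil, Finset.sum_filter]
    apply Finset.sum_congr rfl
    intro x _
    simp [contribD]
  set A := m.divisors.filter (fun x => x ≤ s) with hA
  set E := A.filter (fun x => x * x = m) with hE
  set NE := A.filter (fun x => ¬ x * x = m) with hNE
  have hAsplit : E.card + NE.card = A.card :=
    Finset.card_filter_add_card_filter_not (fun x => x * x = m)
  have hDsplit : A.card + (m.divisors.filter (fun x => ¬ x ≤ s)).card = m.divisors.card :=
    Finset.card_filter_add_card_filter_not (fun x => x ≤ s)
  have hB : (m.divisors.filter (fun x => ¬ x ≤ s)).card = NE.card := by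
    refine Finset.card_bij' (fun d _ => m / d) (fun e _ => m / e) ?_ ?_ ?_ ?_
    · intro d hd
      simp only [Finset.mem_filter, Nat.mem_divisors] at hd
      obtain ⟨f1, f2, f3, _⟩ := div_pair_facts m d hm hd.1.1 (not_le.mp hd.2)
      simp only [hNE, hA, Finset.mem_filter, Nat.mem_divisors]
      exact ⟨⟨⟨f1, Nat.one_le_iff_ne_zero.mp hm⟩, f2⟩, f3⟩
    · intro e he
      simp only [hNE, hA, Finset.mem_filter, Nat.mem_divisors] at he
      obtain ⟨g1, g2, _⟩ := div_pair_facts' m e hm he.1.1.1 he.1.2 he.2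
      simp only [Finset.mem_filter, Nat.mem_divisors]
      exact ⟨⟨g1, Nat.one_le_iff_ne_zero.mp hm⟩, g2⟩
    · intro d hd
      simp only [Finset.mem_filter, Nat.mem_divisors] at hd
      exact (div_pair_facts m d hm hd.1.1 (not_le.mp hd.2)).2.2.2
    · intro e he
      simp only [hNE, hA, Finset.mem_filter, Nat.mem_divisors] at he
      exact (div_pair_facts' m e hm he.1.1.1 he.1.2 he.2).2.2
  have hval : ∑ x ∈ A, (if x * x = m then (1 : Int) else 2) = (E.card : Int) + 2 * NE.card := by
    rw [Finset.sum_ite, Finset.sum_const, Finset.sum_const, nsmul_eq_mul, nsmul_eq_mul]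
    ring
  rw [hsum, hval, ← hDsplit, hB, ← hAsplit, Nat.cast_add, Nat.cast_add]
  ring

theorem card_divisors_six_mul (p : Nat) (hp : p.Prime) (h5 : 5 ≤ p) :
    (6 * p).divisors.card = 8 := by
  have hnd : ¬ p ∣ 6 := by
    intro hd
    have h6 : p ≤ 6 := Nat.le_of_dvd (by decide) hd
    rcases Nat.lt_or_ge p 6 with hlt | hge6
    · have hp5 : p = 5 := le_antisymm (Nat.lt_succ_iff.mp hlt) h5
      rw [hp5] at hd
      exact absurd hd (by decide)
    · have hp6 : p = 6 := le_antisymm h6 hge6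
      rw [hp6] at hp
      exact absurd hp (by decide)
  have hc : Nat.Coprime 6 p := Nat.Coprime.symm ((Nat.Prime.coprime_iff_not_dvd hp).mpr hnd)
  rw [Nat.Coprime.card_divisors_mul hc, Nat.Prime.divisors hp]
  rw [Finset.card_insert_of_notMem
    (fun hmem => absurd ((Finset.mem_singleton.mp hmem) ▸ h5) (by decide)),
    Finset.card_singleton]
  decide

theorem exists_eight (j : Int) : ∃ m : Nat, 1 ≤ m ∧ j ≤ (m : Int) ∧ m.divisors.card = 8 := by
  obtain ⟨p, hge, hp⟩ := Nat.exists_infinite_primes (max 5 j.toNat)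
  have h5 : 5 ≤ p := le_trans (le_max_left _ _) hge
  have hjp : j.toNat ≤ p := le_trans (le_max_right _ _) hge
  refine ⟨6 * p, Nat.one_le_iff_ne_zero.mpr (Nat.mul_ne_zero (by decide) hp.pos.ne'), ?_,
    card_divisors_six_mul p hp h5⟩
  calc j ≤ (j.toNat : Int) := Int.self_le_toNat j
    _ ≤ (p : Int) := Int.ofNat_le.mpr hjp
    _ ≤ ((6 * p : Nat) : Int) := Int.ofNat_le.mpr (Nat.le_mul_of_pos_left p (by decide))

theorem exists_czy (j : Int) : ∃ k : Nat, czy_sfeniczna (j + (k : Int)) = true := by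
  obtain ⟨m, hm, hjm, h8⟩ := exists_eight j
  refine ⟨((m : Int) - j).toNat, ?_⟩
  rw [Int.toNat_of_nonneg (sub_nonneg.mpr hjm), add_comm j, sub_add_cancel]
  unfold czy_sfeniczna
  rw [czyCount_eq m hm, h8]
  rfl

theorem exists_cnt (j : Int) : ∃ k : Nat, count8B (j + (k : Int)) = true := by
  obtain ⟨m, hm, hjm, h8⟩ := exists_eight j
  refine ⟨((m : Int) - j).toNat, ?_⟩
  rw [Int.toNat_of_nonneg (sub_nonneg.mpr hjm), add_comm j, sub_add_cancel]
  unfold count8B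
  rw [if_neg (not_lt.mpr (by exact_mod_cast hm : (1 : Int) ≤ (m : Int))), sqrtLoop_eq m hm, h8]
  rfl

def gapA (j : Int) : Nat := Nat.find (exists_czy j)
def gapB (j : Int) : Nat := Nat.find (exists_cnt j)

theorem gapA_decr (j : Int) (h : czy_sfeniczna j = false) : gapA (j + 1) < gapA j := by
  unfold gapA
  have h0 : Nat.find (exists_czy j) ≠ 0 := by
    intro h1
    have hsp := Nat.find_spec (exists_czy j)
    rw [h1, Nat.cast_zero, add_zero, h] at hsp
    exact Bool.false_ne_true hsp
  have hle : Nat.find (exists_czy (j + 1)) ≤ Nat.find (exists_czy j) - 1 := by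
    apply Nat.find_le
    have hsp := Nat.find_spec (exists_czy j)
    rw [show (j + 1) + ((Nat.find (exists_czy j) - 1 : Nat) : Int)
        = j + (Nat.find (exists_czy j) : Int) from by
      rw [Nat.cast_sub (Nat.one_le_iff_ne_zero.mpr h0), Nat.cast_one]; ring]
    exact hsp
  exact Nat.lt_of_le_of_lt hle (Nat.sub_lt (Nat.pos_of_ne_zero h0) Nat.one_pos)

theorem gapB_decr (j : Int) (h : count8B j = false) : gapB (j + 1) < gapB j := by
  unfold gapB
  have h0 : Nat.find (exists_cnt j) ≠ 0 := by
    intro h1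
    have hsp := Nat.find_spec (exists_cnt j)
    rw [h1, Nat.cast_zero, add_zero, h] at hsp
    exact Bool.false_ne_true hsp
  have hle : Nat.find (exists_cnt (j + 1)) ≤ Nat.find (exists_cnt j) - 1 := by
    apply Nat.find_le
    have hsp := Nat.find_spec (exists_cnt j)
    rw [show (j + 1) + ((Nat.find (exists_cnt j) - 1 : Nat) : Int)
        = j + (Nat.find (exists_cnt j) : Int) from by
      rw [Nat.cast_sub (Nat.one_le_iff_ne_zero.mpr h0), Nat.cast_one]; ring]
    exact hsp
  exact Nat.lt_of_le_of_lt hle (Nat.sub_lt (Nat.pos_of_ne_zero h0) Nat.one_pos)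

-- ===== PORT A (outer loop) =====
-- while p != 3: …  ; the guard '3 ≤ p' makes the function total and agrees with
-- Python's 'p != 3' on every state the entry point reaches (p starts at 0 and only increments).
def loopA (j : Int) (p : Nat) (w : String) : String :=
  if 3 ≤ p then w
  else if czy_sfeniczna j then loopA (j + 1) (p + 1) (w ++ PySem.Int.toStr j ++ " ")
  else loopA (j + 1) p w
termination_by ((3 - p : Nat), gapA j)
decreasing_by
  · exact Prod.Lex.left _ _ (Nat.sub_succ_lt_self 3 p (Nat.lt_of_not_le ‹¬ 3 ≤ p›))
  · exact Prod.Lex.right _ (gapA_decr j (Bool.eq_false_iff.mpr ‹¬ czy_sfeniczna j = true›))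

def liczby_sfeniczne (n : Int) : String := loopA (n + 1) 0 ""

-- ===== PORT B (outer loop) =====
-- collect the next `need` hits into a list, then join 'str(x) + " "' over it
def findThree (j : Int) (need : Nat) : List Int :=
  if need = 0 then []
  else if count8B j then j :: findThree (j + 1) (need - 1)
  else findThree (j + 1) need
termination_by (need, gapB j)
decreasing_by
  · exact Prod.Lex.left _ _ (Nat.sub_lt (Nat.pos_of_ne_zero ‹¬ need = 0›) Nat.one_pos)
  · exact Prod.Lex.right _ (gapB_decr j (Bool.eq_false_iff.mpr ‹¬ count8B j = true›))

def liczby_sfeniczne_alt (n : Int) : String :=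
  String.join ((findThree (n + 1) 3).map (fun x => PySem.Int.toStr x ++ " "))

-- ===== PRECONDITION & SPEC =====
def Spec_liczby_sfeniczne (n : Int) (out : String) : Prop := out = liczby_sfeniczne_alt n
instance (n : Int) (out : String) : Decidable (Spec_liczby_sfeniczne n out) := by unfold Spec_liczby_sfeniczne; infer_instance

-- ===== CLAIM (what is proved, stated in full; the proofs are below) =====
def Claim_equal_liczby_sfeniczne : Prop := ∀ (n : Int), Dom_liczby_sfeniczne n → Spec_liczby_sfeniczne n (liczby_sfeniczne n)

-- ===== LEMMAS AND PROOFS =====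

theorem strfoldl_append (l : List String) : ∀ s : String, l.foldl (· ++ ·) s = s ++ l.foldl (· ++ ·) "" := by
  induction l with
  | nil => intro s; simp
  | cons a l ih => intro s; simp only [List.foldl_cons]; rw [ih (s ++ a), ih ("" ++ a)]; simp [String.append_assoc]

theorem join_cons (a : String) (l : List String) : String.join (a :: l) = a ++ String.join l := by
  simp [String.join]; rw [strfoldl_append l a]

theorem czy_eq_cnt (j : Int) : czy_sfeniczna j = count8B j := by
  by_cases hj : j < 1
  · unfold czy_sfeniczna czyCount count8B
    rw [PySem.List.pyRange_one_eq_nil (by omega), if_pos hj]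
    simp
  · obtain ⟨m, rfl⟩ : ∃ m : Nat, j = (m : Int) := ⟨j.toNat, by omega⟩
    have hm : 1 ≤ m := by omega
    unfold czy_sfeniczna count8B
    rw [if_neg hj, czyCount_eq m hm, sqrtLoop_eq m hm]

theorem loopA_eq (j : Int) (p : Nat) (w : String) :
    loopA j p w = w ++ String.join ((findThree j (3 - p)).map (fun x => PySem.Int.toStr x ++ " ")) := by
  induction j, p, w using loopA.induct with
  | case1 j p w hp =>
      rw [loopA, if_pos hp, findThree, if_pos (by omega)]
      rw [show String.join (List.map (fun x => PySem.Int.toStr x ++ " ") []) = "" from rfl]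
      rw [String.append_empty]
  | case2 j p w hp hczy ih =>
      rw [loopA, if_neg hp, if_pos hczy, ih]
      conv_rhs => rw [findThree]
      rw [if_neg (by omega : ¬ 3 - p = 0), if_pos (by rw [← czy_eq_cnt]; exact hczy)]
      rw [show 3 - p - 1 = 3 - (p + 1) from by omega, List.map_cons, join_cons]
      simp [String.append_assoc]
  | case3 j p w hp hczy ih =>
      rw [loopA, if_neg hp, if_neg hczy, ih]
      conv_rhs => rw [findThree]
      rw [if_neg (by omega : ¬ 3 - p = 0),
        if_neg (by rw [← czy_eq_cnt]; simpa using hczy)]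

-- ===== VERDICT (by name: the statement is the Claim_ definition above) =====
theorem liczby_sfeniczne_spec : Claim_equal_liczby_sfeniczne := by
  intro n _
  unfold Spec_liczby_sfeniczne liczby_sfeniczne liczby_sfeniczne_alt
  simpa using loopA_eq (n + 1) 0 ""
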